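-- pv_equiv track=rewrite | github.com/SubainaNorab/AI-Class-Assistant | Backend/utils/flashcard_generator.py | extract_applications_and_examples
-- ===== SOURCE A (Python) =====
-- def extract_applications_and_examples(content: str) -> str:
--     """Extract applications and examples from content"""
--     content_lower = content.lower()
--
--     # Look for example indicators
--     example_indicators = [
--         'example', 'such as', 'like', 'including', 'for instance',
--         'used in', 'applied to', 'applications include'
--     ]
--
--     for indicator in example_indicators:
--         if indicator in content_lower:
--             sentences = content.split('.')
--             for sentence in sentences:
--                 if indicator in sentence.lower():
--                     return sentence.strip() + "."
--
--     return "The content includes various practical applications and real-world examples."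
-- ===== SOURCE B (Python) =====
-- def extract_applications_and_examples(content: str) -> str:
--     """Extract applications and examples from content"""
--     example_indicators = [
--         'example', 'such as', 'like', 'including', 'for instance',
--         'used in', 'applied to', 'applications include'
--     ]
--
--     # One pass over the sentences: map each indicator to the first sentence containing it.
--     index = {}
--     for sentence in content.split('.'):
--         sentence_lower = sentence.lower()
--         for indicator in example_indicators:
--             if indicator not in index and indicator in sentence_lower:
--                 index[indicator] = sentence
--
--     # Walk the indicators in priority order.
--     for indicator in example_indicators:
--         if indicator in index:
--             return index[indicator].strip() + "."
--
--     return "The content includes various practical applications and real-world examples."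
-- ===== Notes on version B (the rewrite author's own statement) =====
-- stated objective: alternative
-- what changed: Replaces A's nested rescans (for each indicator: substring-test the whole text, then re-split and rescan all sentences) by a single pass over the sentences that builds an indicator-to-first-matching-sentence index, followed by a priority walk over the indicator list.
import Mathlib
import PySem

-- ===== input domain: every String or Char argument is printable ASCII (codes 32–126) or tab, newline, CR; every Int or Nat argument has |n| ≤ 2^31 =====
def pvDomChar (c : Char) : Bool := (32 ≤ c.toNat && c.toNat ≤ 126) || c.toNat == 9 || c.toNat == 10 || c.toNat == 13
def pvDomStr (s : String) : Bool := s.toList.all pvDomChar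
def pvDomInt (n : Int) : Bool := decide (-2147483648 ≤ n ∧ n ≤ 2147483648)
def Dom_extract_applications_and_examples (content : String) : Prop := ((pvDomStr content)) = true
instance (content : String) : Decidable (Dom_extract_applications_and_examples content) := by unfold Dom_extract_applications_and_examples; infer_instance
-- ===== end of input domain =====

-- B replaces A's nested rescans (per indicator, re-split and rescan all sentences) by one pass over
-- the sentences building an indicator -> first-matching-sentence index, then a priority walk
-- over the indicators (objective: alternative decomposition, similar cost).

-- shared module-level constants (the literal list and default string from the Python source)
def pvIndicators : List String :=
  ["example", "such as", "like", "including", "for instance",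
   "used in", "applied to", "applications include"]

def pvDefault : String :=
  "The content includes various practical applications and real-world examples."

-- ===== PORT A =====
-- inner loop: first sentence whose lowercase contains the indicator
def pvFindSentence (ind : String) : List String → Option String
  | [] => none
  | s :: rest =>
    if PySem.Str.isIn ind (PySem.Str.lower s) then some s else pvFindSentence ind rest

-- outer loop over the indicators; A re-splits content each time the outer guard fires
def pvLoopA (content contentLower : String) : List String → String
  | [] => pvDefault
  | ind :: rest =>
    if PySem.Str.isIn ind contentLower then
      -- sep "." is nonempty, so split? is always `some`; getD [] is exact
      match pvFindSentence ind ((PySem.Str.split? content ".").getD []) with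
      | some s => PySem.Str.strip s ++ "."
      | none => pvLoopA content contentLower rest
    else pvLoopA content contentLower rest

def extract_applications_and_examples (content : String) : String :=
  pvLoopA content (PySem.Str.lower content) pvIndicators

-- ===== PORT B =====
-- one pass over the sentences: index[ind] = first sentence whose lowercase contains ind
def pvBuildIndex (sentences : List String) : PySem.Dict String String :=
  sentences.foldl
    (fun d s =>
      pvIndicators.foldl
        (fun d ind =>
          if !d.contains ind && PySem.Str.isIn ind (PySem.Str.lower s) then d.insert ind s else d)
        d)
    PySem.Dict.empty

-- priority walk over the indicators
def pvLoopB (d : PySem.Dict String String) : List String → String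
  | [] => pvDefault
  | ind :: rest =>
    match d.get? ind with
    | some s => PySem.Str.strip s ++ "."
    | none => pvLoopB d rest

def extract_applications_and_examples_alt (content : String) : String :=
  pvLoopB (pvBuildIndex ((PySem.Str.split? content ".").getD [])) pvIndicators

-- ===== PRECONDITION & SPEC =====
def Spec_extract_applications_and_examples (content : String) (out : String) : Prop := out = extract_applications_and_examples_alt content
instance (content : String) (out : String) : Decidable (Spec_extract_applications_and_examples content out) := by unfold Spec_extract_applications_and_examples; infer_instance

-- ===== CLAIM (what is proved, stated in full; the proofs are below) =====
def Claim_equal_extract_applications_and_examples : Prop := ∀ (content : String), Dom_extract_applications_and_examples content → Spec_extract_applications_and_examples content (extract_applications_and_examples content)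

-- ===== LEMMAS AND PROOFS =====

-- a clean structural model of Python's  s.split('.')
def pvParts : List Char → List (List Char)
  | [] => [[]]
  | c :: rest => if c = '.' then [] :: pvParts rest else (pvParts rest).modifyHead (c :: ·)

theorem pvParts_ne_nil (l : List Char) : pvParts l ≠ [] := by
  cases l with
  | nil => simp [pvParts]
  | cons c rest =>
    simp only [pvParts]
    split
    · simp
    · cases h : pvParts rest with
      | nil => exact absurd h (pvParts_ne_nil rest)
      | cons q qs => simp [List.modifyHead]

theorem pvSplitOn_go_eq (l : List Char) : ∀ (fuel : Nat) (cur : List Char) (acc : List (List Char)),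
    l.length ≤ fuel →
    PySem.Chars.splitOn.go ['.'] (fuel + 1) l cur acc
      = acc.reverse ++ (pvParts l).modifyHead (cur.reverse ++ ·) := by
  induction l with
  | nil =>
    intro fuel cur acc _
    rw [PySem.Chars.splitOn.go]
    simp [pvParts, List.modifyHead]
    omega
  | cons c rest ih =>
    intro fuel cur acc hlen
    rw [PySem.Chars.splitOn.go]
    simp only [List.length_cons] at hlen
    obtain ⟨f, rfl⟩ : ∃ f, fuel = f + 1 := ⟨fuel - 1, by omega⟩
    by_cases hc : c = '.'
    · subst hc
      rw [if_pos (by rw [List.isPrefixOf_iff_prefix]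
                     exact List.cons_prefix_cons.mpr ⟨rfl, List.nil_prefix⟩)]
      simp only [List.length_singleton, List.drop_one, List.tail_cons]
      rw [ih f [] (cur.reverse :: acc) (by omega)]
      cases h : pvParts rest with
      | nil => exact absurd h (pvParts_ne_nil rest)
      | cons q qs => simp [pvParts, h, List.modifyHead]
    · rw [if_neg (by rw [List.isPrefixOf_iff_prefix]
                     exact fun h => hc (List.cons_prefix_cons.mp h).1.symm)]
      rw [ih f (c :: cur) acc (by omega)]
      cases h : pvParts rest with
      | nil => exact absurd h (pvParts_ne_nil rest)
      | cons q qs => simp [pvParts, hc, h, List.modifyHead]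

theorem pvSplitOn_eq (l : List Char) : PySem.Chars.splitOn l ['.'] = pvParts l := by
  unfold PySem.Chars.splitOn
  rw [pvSplitOn_go_eq l l.length [] [] le_rfl]
  cases h : pvParts l with
  | nil => exact absurd h (pvParts_ne_nil l)
  | cons q qs => simp [List.modifyHead]

-- prefix transfer: a dot-free needle is a prefix of l iff it is a prefix of the first piece
theorem pvPrefix_head (nd l : List Char) (hnd : '.' ∉ nd) :
    nd <+: l ↔ nd <+: (pvParts l).headI := by
  induction l generalizing nd with
  | nil => simp [pvParts]
  | cons c rest ih =>
    by_cases hc : c = '.'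
    · subst hc
      simp only [pvParts, List.headI]
      constructor
      · intro h
        cases nd with
        | nil => exact List.nil_prefix
        | cons d nd' =>
          exact absurd ((List.cons_prefix_cons.mp h).1 ▸ List.mem_cons_self) hnd
      · intro h
        have : nd = [] := List.prefix_nil.mp h
        subst this; exact List.nil_prefix
    · simp only [pvParts, if_neg hc]
      cases hp : pvParts rest with
      | nil => exact absurd hp (pvParts_ne_nil rest)
      | cons q qs =>
        simp only [List.modifyHead, List.headI]
        cases nd with
        | nil => simp
        | cons d nd' =>
          have hnd' : '.' ∉ nd' := fun h => hnd (List.mem_cons_of_mem _ h)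
          have := ih nd' hnd'
          rw [hp] at this
          simp only [List.headI] at this
          constructor
          · intro h
            obtain ⟨rfl, h2⟩ := (List.cons_prefix_cons).mp h
            exact List.cons_prefix_cons.mpr ⟨rfl, this.mp h2⟩
          · intro h
            obtain ⟨rfl, h2⟩ := (List.cons_prefix_cons).mp h
            exact List.cons_prefix_cons.mpr ⟨rfl, this.mpr h2⟩

-- infix transfer: a dot-free needle is an infix of l iff it is an infix of some piece
theorem pvInfix_parts (nd l : List Char) (hnd : '.' ∉ nd) :
    nd <:+: l ↔ ∃ p ∈ pvParts l, nd <:+: p := by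
  induction l generalizing nd with
  | nil => simp [pvParts]
  | cons c rest ih =>
    by_cases hc : c = '.'
    · subst hc
      simp only [pvParts]
      rw [List.infix_cons_iff]
      constructor
      · rintro (h | h)
        · cases nd with
          | nil => exact ⟨[], by simp⟩
          | cons d nd' =>
            exact absurd ((List.cons_prefix_cons.mp h).1 ▸ List.mem_cons_self) hnd
        · obtain ⟨p, hp, hip⟩ := (ih nd hnd).mp h
          exact ⟨p, List.mem_cons_of_mem _ hp, hip⟩
      · rintro ⟨p, hp, hip⟩
        rcases List.mem_cons.mp hp with rfl | hp
        · have : nd = [] := List.eq_nil_of_infix_nil hip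
          subst this; exact Or.inl List.nil_prefix
        · exact Or.inr ((ih nd hnd).mpr ⟨p, hp, hip⟩)
    · simp only [pvParts, if_neg hc]
      cases hp : pvParts rest with
      | nil => exact absurd hp (pvParts_ne_nil rest)
      | cons q qs =>
        simp only [List.modifyHead]
        rw [List.infix_cons_iff]
        have hpre := pvPrefix_head nd (c :: rest) hnd
        rw [show pvParts (c :: rest) = (c :: q) :: qs by simp [pvParts, hc, hp, List.modifyHead]] at hpre
        simp only [List.headI] at hpre
        have hih := ih nd hnd
        rw [hp] at hih
        constructor
        · rintro (h | h)
          · exact ⟨c :: q, List.mem_cons_self, (hpre.mp h).isInfix⟩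
          · obtain ⟨p, hmem, hip⟩ := hih.mp h
            rcases List.mem_cons.mp hmem with rfl | hmem
            · exact ⟨c :: p, List.mem_cons_self, hip.trans (List.suffix_cons c p).isInfix⟩
            · exact ⟨p, List.mem_cons_of_mem _ hmem, hip⟩
        · rintro ⟨p, hmem, hip⟩
          rcases List.mem_cons.mp hmem with rfl | hmem
          · rw [List.infix_cons_iff] at hip
            rcases hip with h | h
            · exact Or.inl (hpre.mpr h)
            · exact Or.inr (hih.mpr ⟨q, List.mem_cons_self, h⟩)
          · exact Or.inr (hih.mpr ⟨p, List.mem_cons_of_mem _ hmem, hip⟩)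

theorem pvChar_toNat_ofNat (n : Nat) (h : n < 55296) : (Char.ofNat n).toNat = n := by
  unfold Char.ofNat
  rw [dif_pos (Or.inl h)]
  simp [Char.ofNatAux, Char.toNat, UInt32.toNat_ofNatLT]

theorem pvLowerChar_dot_iff (c : Char) : PySem.Chars.lowerChar c = '.' ↔ c = '.' := by
  unfold PySem.Chars.lowerChar PySem.Chars.isupper
  split
  · rename_i h
    simp only [Bool.and_eq_true, decide_eq_true_eq] at h
    constructor
    · intro heq
      exfalso
      have hA : 'A'.toNat ≤ c.toNat := Fin.mk_le_mk.mp h.1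
      have hZ : c.toNat ≤ 'Z'.toNat := Fin.mk_le_mk.mp h.2
      have hA' : 'A'.toNat = 65 := rfl
      have hZ' : 'Z'.toNat = 90 := rfl
      have h1 : c.toNat + 32 < 55296 := by omega
      have h2 : (Char.ofNat (c.toNat + 32)).toNat = c.toNat + 32 := pvChar_toNat_ofNat _ h1
      rw [heq] at h2
      have h3 : ('.').toNat = 46 := rfl
      omega
    · intro heq
      subst heq
      exact absurd h (by decide)
  · exact Iff.rfl

theorem pvParts_lower (l : List Char) :
    pvParts (PySem.Chars.lower l) = (pvParts l).map PySem.Chars.lower := by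
  induction l with
  | nil => simp [pvParts, PySem.Chars.lower]
  | cons c rest ih =>
    simp only [PySem.Chars.lower, List.map_cons, pvParts]
    by_cases hc : c = '.'
    · rw [if_pos ((pvLowerChar_dot_iff c).mpr hc), if_pos hc]
      simp only [PySem.Chars.lower] at ih
      simp [ih, PySem.Chars.lower]
    · rw [if_neg (fun h => hc ((pvLowerChar_dot_iff c).mp h)), if_neg hc]
      simp only [PySem.Chars.lower] at ih
      rw [ih]
      cases hp : pvParts rest with
      | nil => exact absurd hp (pvParts_ne_nil rest)
      | cons q qs => simp [List.modifyHead, PySem.Chars.lower]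

-- A's outer guard agrees with "some sentence matches" (sentences as strings)
theorem pvSentences_toList (content : String) :
    ((PySem.Str.split? content ".").getD []).map String.toList = pvParts content.toList := by
  have h := PySem.Str.split?_map content "."
  rw [show (".":String).toList = ['.'] from rfl] at h
  unfold PySem.Chars.split? at h
  simp only [List.isEmpty_cons] at h
  rw [pvSplitOn_eq] at h
  cases hs : PySem.Str.split? content "." with
  | none => rw [hs] at h; simp at h
  | some ss => rw [hs] at h; simpa using h

theorem pvFindSentence_isSome (ind : String) (ss : List String) :
    (pvFindSentence ind ss).isSome = true ↔
      ∃ s ∈ ss, PySem.Str.isIn ind (PySem.Str.lower s) = true := by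
  induction ss with
  | nil => simp [pvFindSentence]
  | cons s rest ih =>
    simp only [pvFindSentence]
    split
    · rename_i h
      simp only [Option.isSome_some, true_iff]
      exact ⟨s, List.mem_cons_self, h⟩
    · rename_i h
      rw [ih]
      constructor
      · rintro ⟨t, ht, hit⟩; exact ⟨t, List.mem_cons_of_mem _ ht, hit⟩
      · rintro ⟨t, ht, hit⟩
        rcases List.mem_cons.mp ht with rfl | ht
        · exact absurd hit h
        · exact ⟨t, ht, hit⟩

theorem pvGuard_iff (content ind : String) (hnd : '.' ∉ ind.toList) :
    PySem.Str.isIn ind (PySem.Str.lower content) = true ↔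
      (pvFindSentence ind ((PySem.Str.split? content ".").getD [])).isSome = true := by
  rw [pvFindSentence_isSome]
  rw [PySem.Str.isIn_eq, PySem.Str.toList_lower, PySem.Chars.isIn_iff_infix]
  rw [pvInfix_parts ind.toList (PySem.Chars.lower content.toList) hnd]
  rw [pvParts_lower, ← pvSentences_toList content]
  constructor
  · rintro ⟨p, hp, hip⟩
    obtain ⟨q, hq, rfl⟩ := List.mem_map.mp hp
    obtain ⟨s, hs, rfl⟩ := List.mem_map.mp hq
    refine ⟨s, hs, ?_⟩
    rw [PySem.Str.isIn_eq, PySem.Str.toList_lower, PySem.Chars.isIn_iff_infix]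
    exact hip
  · rintro ⟨s, hs, h⟩
    rw [PySem.Str.isIn_eq, PySem.Str.toList_lower, PySem.Chars.isIn_iff_infix] at h
    exact ⟨PySem.Chars.lower s.toList,
      List.mem_map_of_mem (List.mem_map_of_mem hs), h⟩

-- dict index characterization
theorem pvInner_get? (s : String) (l : List String) (d : PySem.Dict String String) (ind : String) :
    (l.foldl (fun d i =>
        if !d.contains i && PySem.Str.isIn i (PySem.Str.lower s) then d.insert i s else d) d).get? ind
      = if ind ∈ l then
          (d.get? ind).or (if PySem.Str.isIn ind (PySem.Str.lower s) then some s else none)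
        else d.get? ind := by
  induction l generalizing d with
  | nil => simp
  | cons a rest ih =>
    simp only [List.foldl_cons]
    rw [ih]
    by_cases ha : ind = a
    · subst ha
      rw [if_pos (List.mem_cons_self)]
      by_cases hc : (!d.contains ind && PySem.Str.isIn ind (PySem.Str.lower s)) = true
      · rw [if_pos hc]
        simp only [Bool.and_eq_true, Bool.not_eq_true'] at hc
        have hnone : d.get? ind = none := by
          rw [PySem.Dict.contains_eq_isSome_get?] at hc
          simpa using hc.1
        rw [PySem.Dict.get?_insert]
        simp only [hc.2]
        simp [hnone]
      · rw [if_neg hc]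
        simp only [Bool.and_eq_true, Bool.not_eq_true', not_and_or] at hc
        rcases hc with hc | hc
        · have hcon : d.contains ind = true := by simpa using hc
          rw [PySem.Dict.contains_eq_isSome_get?] at hcon
          obtain ⟨v, hv⟩ := Option.isSome_iff_exists.mp hcon
          simp [hv]
        · have hin : PySem.Str.isIn ind (PySem.Str.lower s) = false := Bool.eq_false_iff.mpr hc
          simp only [hin]
          simp
    · have hA : (if (!d.contains a && PySem.Str.isIn a (PySem.Str.lower s)) = true
            then d.insert a s else d).get? ind = d.get? ind := by
        split
        · exact PySem.Dict.get?_insert_of_ne _ _ ha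
        · rfl
      rw [hA]
      simp only [List.mem_cons, ha, false_or]

theorem pvBuildIndex_get? (sentences : List String) (ind : String) (hmem : ind ∈ pvIndicators) :
    (pvBuildIndex sentences).get? ind = pvFindSentence ind sentences := by
  suffices h : ∀ (ss : List String) (d : PySem.Dict String String),
      (ss.foldl (fun d s =>
        pvIndicators.foldl (fun d i =>
          if !d.contains i && PySem.Str.isIn i (PySem.Str.lower s) then d.insert i s else d) d) d).get? ind
        = (d.get? ind).or (pvFindSentence ind ss) by
    unfold pvBuildIndex
    rw [h sentences PySem.Dict.empty]
    simp [PySem.Dict.get?_empty]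
  intro ss
  induction ss with
  | nil => intro d; simp [pvFindSentence]
  | cons s rest ih =>
    intro d
    simp only [List.foldl_cons]
    rw [ih]
    rw [pvInner_get? s pvIndicators d ind, if_pos hmem]
    simp only [pvFindSentence]
    split
    · rw [Option.or_assoc]
      simp
    · simp

-- the two loops agree
theorem pvLoops_eq (content : String) (l : List String)
    (hl : ∀ ind ∈ l, ind ∈ pvIndicators ∧ '.' ∉ ind.toList) :
    pvLoopA content (PySem.Str.lower content) l
      = pvLoopB (pvBuildIndex ((PySem.Str.split? content ".").getD [])) l := by
  induction l with
  | nil => rfl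
  | cons ind rest ih =>
    obtain ⟨hmem, hnd⟩ := hl ind List.mem_cons_self
    have hrest : ∀ i ∈ rest, i ∈ pvIndicators ∧ '.' ∉ i.toList :=
      fun i hi => hl i (List.mem_cons_of_mem _ hi)
    simp only [pvLoopA, pvLoopB]
    rw [pvBuildIndex_get? _ ind hmem]
    by_cases hg : PySem.Str.isIn ind (PySem.Str.lower content) = true
    · rw [if_pos hg]
      have := (pvGuard_iff content ind hnd).mp hg
      obtain ⟨s, hs⟩ := Option.isSome_iff_exists.mp this
      rw [hs]
    · rw [if_neg hg]
      have : (pvFindSentence ind ((PySem.Str.split? content ".").getD [])).isSome ≠ true :=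
        fun h => hg ((pvGuard_iff content ind hnd).mpr h)
      have hnone : pvFindSentence ind ((PySem.Str.split? content ".").getD []) = none := by
        cases h : pvFindSentence ind ((PySem.Str.split? content ".").getD []) with
        | none => rfl
        | some s => rw [h] at this; simp at this
      rw [hnone]
      exact ih hrest

-- ===== VERDICT (by name: the statement is the Claim_ definition above) =====
theorem extract_applications_and_examples_spec : Claim_equal_extract_applications_and_examples := by
  intro content _
  unfold Spec_extract_applications_and_examples extract_applications_and_examples
    extract_applications_and_examples_alt
  exact pvLoops_eq content pvIndicators (fun ind h => ⟨h, by fin_cases h <;> decide⟩)
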